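-- pv_equiv track=rewrite | github.com/DankiLiu/dliu-ds-ma | parse/evaluation.py | prediction_metrics_per_label
-- ===== SOURCE A (Python) =====
-- from typing import List
--
-- def prediction_metrics_per_label(predictions: List, labels: List, label):
--     """return TP, FN, FP, TN of n selected label.
--     preditions: predicted labels for n examples,
--     labels: ground truth labels for n examples,
--     label: the label to be evaluated"""
--     TP, FN, FP, TN = 0, 0, 0, 0
--     num = len(predictions)
--     for i in range(num):
--         cur_prediction, cur_labels = predictions[i], labels[i]
--         # if the label is in labels, check if it is predicted
--         if label in cur_labels:
--             if label in cur_prediction: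
--                 TP = TP + 1
--             else:
--                 FN = FN + 1
--         else:
--             # if the label is not in labels, check if it is wrongly predicted
--             if label in cur_prediction:
--                 FP = FP + 1
--             else:
--                 TN = TN + 1
--     return TP, FN, FP, TN
-- ===== SOURCE B (Python) =====
-- def prediction_metrics_per_label(predictions, labels, label):
--     """Different decomposition: three simple totals in comprehension sums,
--     then derive FN, FP, TN arithmetically."""
--     n = len(predictions)
--     tp = sum(1 for i in range(n) if label in labels[i] and label in predictions[i])
--     actual = sum(1 for i in range(n) if label in labels[i])
--     predicted = sum(1 for i in range(n) if label in predictions[i])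
--     return tp, actual - tp, predicted - tp, n - actual - predicted + tp
-- ===== Notes on version B (the rewrite author's own statement) =====
-- stated objective: alternative
-- what changed: Replaces the single four-way branching classification loop by three independent comprehension-sum totals (TP, actual, predicted) from which FN, FP and TN are derived arithmetically.
import Mathlib
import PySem

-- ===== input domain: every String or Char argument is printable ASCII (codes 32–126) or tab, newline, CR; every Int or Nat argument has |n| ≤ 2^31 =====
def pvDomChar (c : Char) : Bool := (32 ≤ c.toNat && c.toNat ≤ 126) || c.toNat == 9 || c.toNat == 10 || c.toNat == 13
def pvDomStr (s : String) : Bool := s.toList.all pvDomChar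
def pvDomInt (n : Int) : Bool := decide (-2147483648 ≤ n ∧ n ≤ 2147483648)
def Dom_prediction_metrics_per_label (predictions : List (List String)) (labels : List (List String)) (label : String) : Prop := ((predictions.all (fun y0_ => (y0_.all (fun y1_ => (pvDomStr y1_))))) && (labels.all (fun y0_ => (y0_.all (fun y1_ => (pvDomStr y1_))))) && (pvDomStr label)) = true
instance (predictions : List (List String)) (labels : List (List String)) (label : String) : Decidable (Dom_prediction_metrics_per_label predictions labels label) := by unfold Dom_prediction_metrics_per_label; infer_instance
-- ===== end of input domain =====

-- B replaces A's four-way classification loop by three independent counts (TP, actual, predicted)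
-- from which FN, FP, TN are derived arithmetically; same O(n) cost (objective: alternative).


-- ===== PORT A =====
-- literal port of A's single loop over range(len(predictions)); pyGet? … |>.getD [] is
-- exact on Pre_ (all indices are in range there), the getD only makes the function total
def prediction_metrics_per_label (predictions : List (List String)) (labels : List (List String)) (label : String) : Int × Int × Int × Int :=
  (PySem.List.pyRange 0 (predictions.length : Int) 1).foldl (fun (s : Int × Int × Int × Int) i =>
    let cur_prediction := (PySem.List.pyGet? predictions i).getD []
    let cur_labels := (PySem.List.pyGet? labels i).getD []
    if label ∈ cur_labels then
      if label ∈ cur_prediction then (s.1 + 1, s.2.1, s.2.2.1, s.2.2.2)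
      else (s.1, s.2.1 + 1, s.2.2.1, s.2.2.2)
    else
      if label ∈ cur_prediction then (s.1, s.2.1, s.2.2.1 + 1, s.2.2.2)
      else (s.1, s.2.1, s.2.2.1, s.2.2.2 + 1)) (0, 0, 0, 0)

-- ===== PORT B =====
-- port of Source B: three comprehension-sum totals over range(len(predictions)), then arithmetic
def prediction_metrics_per_label_alt (predictions : List (List String)) (labels : List (List String)) (label : String) : Int × Int × Int × Int :=
  let tp : Int := (PySem.List.pyRange 0 (predictions.length : Int) 1).foldl (fun a i => if label ∈ (PySem.List.pyGet? labels i).getD [] ∧ label ∈ (PySem.List.pyGet? predictions i).getD [] then a + 1 else a) 0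
  let actual : Int := (PySem.List.pyRange 0 (predictions.length : Int) 1).foldl (fun a i => if label ∈ (PySem.List.pyGet? labels i).getD [] then a + 1 else a) 0
  let predicted : Int := (PySem.List.pyRange 0 (predictions.length : Int) 1).foldl (fun a i => if label ∈ (PySem.List.pyGet? predictions i).getD [] then a + 1 else a) 0
  (tp, actual - tp, predicted - tp, (predictions.length : Int) - actual - predicted + tp)

-- ===== PRECONDITION & SPEC =====
-- Pre_ excludes exactly the inputs where A raises IndexError: labels shorter than predictions.
def Pre_prediction_metrics_per_label (predictions : List (List String)) (labels : List (List String)) (label : String) : Prop := predictions.length ≤ labels.length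
instance (predictions : List (List String)) (labels : List (List String)) (label : String) : Decidable (Pre_prediction_metrics_per_label predictions labels label) := by unfold Pre_prediction_metrics_per_label; infer_instance
def pvWitness_prediction_metrics_per_label : List (List String) × List (List String) × String := ([["a"], ["b"]], [["a", "b"], ["c"]], "a")
def Spec_prediction_metrics_per_label (predictions : List (List String)) (labels : List (List String)) (label : String) (out : Int × Int × Int × Int) : Prop := out = prediction_metrics_per_label_alt predictions labels label
instance (predictions : List (List String)) (labels : List (List String)) (label : String) (out : Int × Int × Int × Int) : Decidable (Spec_prediction_metrics_per_label predictions labels label out) := by unfold Spec_prediction_metrics_per_label; infer_instance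

-- ===== CLAIM (what is proved, stated in full; the proofs are below) =====
def Claim_equal_prediction_metrics_per_label : Prop := ∀ (predictions : List (List String)) (labels : List (List String)) (label : String), Dom_prediction_metrics_per_label predictions labels label → Pre_prediction_metrics_per_label predictions labels label → Spec_prediction_metrics_per_label predictions labels label (prediction_metrics_per_label predictions labels label)

-- ===== LEMMAS AND PROOFS =====

-- count of indices in r satisfying P (as an Int), written as the fold B uses
def pvCnt (P : Int → Prop) [DecidablePred P] (r : List Int) : Int :=
  r.foldl (fun a i => if P i then a + 1 else a) 0

theorem pvCnt_shift (P : Int → Prop) [DecidablePred P] :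
    ∀ (r : List Int) (s : Int), r.foldl (fun a i => if P i then a + 1 else a) s = s + pvCnt P r := by
  intro r
  induction r with
  | nil => intro s; simp [pvCnt]
  | cons i r ih =>
    intro s
    have h1 := ih (if P i then s + 1 else s)
    have h2 := ih (if P i then (0 : Int) + 1 else (0 : Int))
    simp only [pvCnt, List.foldl_cons] at h1 h2 ⊢
    rw [h1, h2]
    by_cases h : P i <;> simp [h] <;> omega

theorem pvCnt_cons (P : Int → Prop) [DecidablePred P] (i : Int) (r : List Int) :
    pvCnt P (i :: r) = (if P i then 1 else 0) + pvCnt P r := by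
  simp only [pvCnt, List.foldl_cons]
  rw [pvCnt_shift P r]
  by_cases h : P i <;> simp [h, pvCnt]

-- A's loop computes the four disjoint counts
theorem pvFoldA (predictions labels : List (List String)) (label : String) :
    ∀ (r : List Int) (s : Int × Int × Int × Int),
    r.foldl (fun (s : Int × Int × Int × Int) i =>
      let cur_prediction := (PySem.List.pyGet? predictions i).getD []
      let cur_labels := (PySem.List.pyGet? labels i).getD []
      if label ∈ cur_labels then
        if label ∈ cur_prediction then (s.1 + 1, s.2.1, s.2.2.1, s.2.2.2)
        else (s.1, s.2.1 + 1, s.2.2.1, s.2.2.2)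
      else
        if label ∈ cur_prediction then (s.1, s.2.1, s.2.2.1 + 1, s.2.2.2)
        else (s.1, s.2.1, s.2.2.1, s.2.2.2 + 1)) s
    = (s.1 + pvCnt (fun i => label ∈ (PySem.List.pyGet? labels i).getD [] ∧ label ∈ (PySem.List.pyGet? predictions i).getD []) r,
       s.2.1 + pvCnt (fun i => label ∈ (PySem.List.pyGet? labels i).getD [] ∧ ¬ label ∈ (PySem.List.pyGet? predictions i).getD []) r,
       s.2.2.1 + pvCnt (fun i => ¬ label ∈ (PySem.List.pyGet? labels i).getD [] ∧ label ∈ (PySem.List.pyGet? predictions i).getD []) r,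
       s.2.2.2 + pvCnt (fun i => ¬ label ∈ (PySem.List.pyGet? labels i).getD [] ∧ ¬ label ∈ (PySem.List.pyGet? predictions i).getD []) r) := by
  intro r
  induction r with
  | nil => intro s; simp [pvCnt]
  | cons i r ih =>
    intro s
    simp only [List.foldl_cons]
    rw [ih]
    simp only [pvCnt_cons]
    by_cases h1 : label ∈ (PySem.List.pyGet? labels i).getD [] <;>
      by_cases h2 : label ∈ (PySem.List.pyGet? predictions i).getD [] <;>
        simp [h1, h2, Prod.ext_iff] <;> omega

-- splitting a count by a second predicate, both ways
theorem pvCnt_split (P Q : Int → Prop) [DecidablePred P] [DecidablePred Q] (r : List Int) :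
    pvCnt P r = pvCnt (fun i => P i ∧ Q i) r + pvCnt (fun i => P i ∧ ¬ Q i) r := by
  induction r with
  | nil => simp [pvCnt]
  | cons i r ih =>
    simp only [pvCnt_cons]
    by_cases h1 : P i <;> by_cases h2 : Q i <;> simp [h1, h2] <;> omega

theorem pvCnt_split' (P Q : Int → Prop) [DecidablePred P] [DecidablePred Q] (r : List Int) :
    pvCnt Q r = pvCnt (fun i => P i ∧ Q i) r + pvCnt (fun i => ¬ P i ∧ Q i) r := by
  induction r with
  | nil => simp [pvCnt]
  | cons i r ih =>
    simp only [pvCnt_cons]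
    by_cases h1 : P i <;> by_cases h2 : Q i <;> simp [h1, h2] <;> omega

-- the four disjoint counts partition the index list
theorem pvCnt_partition (P Q : Int → Prop) [DecidablePred P] [DecidablePred Q] (r : List Int) :
    pvCnt (fun i => P i ∧ Q i) r + pvCnt (fun i => P i ∧ ¬ Q i) r
      + pvCnt (fun i => ¬ P i ∧ Q i) r + pvCnt (fun i => ¬ P i ∧ ¬ Q i) r = (r.length : Int) := by
  induction r with
  | nil => simp [pvCnt]
  | cons i r ih =>
    simp only [pvCnt_cons, List.length_cons]
    by_cases h1 : P i <;> by_cases h2 : Q i <;> simp [h1, h2] <;> omega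

-- ===== VERDICT (by name: the statement is the Claim_ definition above) =====
theorem prediction_metrics_per_label_spec : Claim_equal_prediction_metrics_per_label := by
  intro predictions labels label _ _
  unfold Spec_prediction_metrics_per_label
  unfold prediction_metrics_per_label prediction_metrics_per_label_alt
  rw [pvFoldA]
  have h1 := pvCnt_split (fun i => label ∈ (PySem.List.pyGet? labels i).getD []) (fun i => label ∈ (PySem.List.pyGet? predictions i).getD []) (PySem.List.pyRange 0 (predictions.length : Int) 1)
  have h2 := pvCnt_split' (fun i => label ∈ (PySem.List.pyGet? labels i).getD []) (fun i => label ∈ (PySem.List.pyGet? predictions i).getD []) (PySem.List.pyRange 0 (predictions.length : Int) 1)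
  have h3 := pvCnt_partition (fun i => label ∈ (PySem.List.pyGet? labels i).getD []) (fun i => label ∈ (PySem.List.pyGet? predictions i).getD []) (PySem.List.pyRange 0 (predictions.length : Int) 1)
  have hlen : (((PySem.List.pyRange 0 (predictions.length : Int) 1).length : Int)) = (predictions.length : Int) := by
    rw [PySem.List.length_pyRange_one]; omega
  rw [hlen] at h3
  simp only [pvCnt] at h1 h2 h3 ⊢
  simp only [Prod.mk.injEq]
  refine ⟨by omega, by omega, by omega, by omega⟩
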